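-- pv_equiv track=rewrite | github.com/Hobiron03/atcoder | AtCoderBeginners Selection/182/b.py | calc_max_gcd_num
-- ===== SOURCE A (Python) =====
-- def calc_max_gcd_num(nums: list) -> int:
--     max_gcd = 0
--     max_gcd_num = 0
--     for i in range(2, max(nums)+1):
--         # step2:iのgcpを求める
--         gcd = 0
--         for num in nums:
--             if num % i == 0:
--                 gcd += 1
--
--         # step3: if gcdがmax_gcdより多ければswap
--         if gcd > max_gcd:
--             max_gcd = gcd
--             max_gcd_num = i
--
--     return max_gcd_num
-- ===== SOURCE B (Python) =====
-- def calc_max_gcd_num(nums: list) -> int: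
--     m = max(nums)
--     cnt = {}
--     zeros = 0
--     for num in nums:
--         a = abs(num)
--         if a == 0:
--             zeros += 1
--         else:
--             d = 1
--             while d * d <= a:
--                 if a % d == 0:
--                     cnt[d] = cnt.get(d, 0) + 1
--                     e = a // d
--                     if e != d:
--                         cnt[e] = cnt.get(e, 0) + 1
--                 d += 1
--     max_gcd = 0
--     max_gcd_num = 0
--     for i in range(2, m + 1):
--         gcd = zeros + cnt.get(i, 0)
--         if gcd > max_gcd:
--             max_gcd = gcd
--             max_gcd_num = i
--     return max_gcd_num
-- ===== Notes on version B (the rewrite author's own statement) =====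
-- stated objective: faster
-- what changed: Replaced A's scan of the whole list for every candidate i in 2..max(nums) by a divisor counter built in one pass (sqrt-bounded divisor enumeration per element) plus an O(1) counter lookup per candidate.
import Mathlib
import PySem

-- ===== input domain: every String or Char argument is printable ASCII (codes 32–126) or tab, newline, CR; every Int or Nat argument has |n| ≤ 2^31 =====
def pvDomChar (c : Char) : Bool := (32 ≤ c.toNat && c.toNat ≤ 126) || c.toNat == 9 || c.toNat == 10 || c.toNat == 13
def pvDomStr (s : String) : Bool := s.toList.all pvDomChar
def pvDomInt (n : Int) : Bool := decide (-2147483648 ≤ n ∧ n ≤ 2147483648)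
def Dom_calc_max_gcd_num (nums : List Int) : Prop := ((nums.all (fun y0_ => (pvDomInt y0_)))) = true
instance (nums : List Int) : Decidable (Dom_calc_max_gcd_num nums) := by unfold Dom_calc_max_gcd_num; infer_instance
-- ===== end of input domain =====

-- B replaces A's per-candidate scan of the whole list by a divisor counter built in one pass
-- (sqrt-bounded divisor enumeration per element) and an O(1) lookup per candidate (objective: faster).

-- ===== PORT A =====
def calc_max_gcd_num (nums : List Int) : Int :=
  match PySem.List.max? nums (fun x => x) with
  | none => 0  -- unreachable: max([]) raises ValueError, excluded by Pre_
  | some m =>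
    ((PySem.List.pyRange 2 (m + 1) 1).foldl
      (fun (st : Int × Int) i =>
        let gcd := nums.foldl (fun g num => if PySem.Int.mod num i = 0 then g + 1 else g) 0
        if gcd > st.1 then (gcd, i) else st)
      (0, 0)).2

-- ===== PORT B =====
-- termination helper for the while-loop below (cited in decreasing_by)
theorem pv_le_of_sq_le {d a : Int} (h : d * d ≤ a) : d ≤ a := by
  by_cases hd : d ≤ 0
  · nlinarith
  · nlinarith

-- 'while d * d <= a: if a % d == 0: cnt[d] += 1; e = a // d; if e != d: cnt[e] += 1; d += 1'
def pvDivLoop (a : Int) (cnt : PySem.Dict Int Int) (d : Int) : PySem.Dict Int Int :=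
  if h : d * d ≤ a then
    let cnt1 :=
      if PySem.Int.mod a d = 0 then
        let c2 := cnt.insert d (cnt.getD d 0 + 1)
        let e := PySem.Int.floordiv a d
        if e ≠ d then c2.insert e (c2.getD e 0 + 1) else c2
      else cnt
    pvDivLoop a cnt1 (d + 1)
  else cnt
termination_by (a + 1 - d).toNat
decreasing_by
  have := pv_le_of_sq_le h
  omega

def calc_max_gcd_num_alt (nums : List Int) : Int :=
  match PySem.List.max? nums (fun x => x) with
  | none => 0  -- unreachable: max([]) raises ValueError, excluded by Pre_
  | some m =>
    let st1 := nums.foldl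
      (fun (st : PySem.Dict Int Int × Int) num =>
        let a := |num|
        if a = 0 then (st.1, st.2 + 1)
        else (pvDivLoop a st.1 1, st.2))
      (PySem.Dict.empty, 0)
    ((PySem.List.pyRange 2 (m + 1) 1).foldl
      (fun (st : Int × Int) i =>
        let gcd := st1.2 + st1.1.getD i 0
        if gcd > st.1 then (gcd, i) else st)
      (0, 0)).2

-- ===== PRECONDITION & SPEC =====
-- Pre_ excludes only the empty list, on which A raises ValueError (max of an empty sequence).
def Pre_calc_max_gcd_num (nums : List Int) : Prop := nums ≠ []
instance (nums : List Int) : Decidable (Pre_calc_max_gcd_num nums) := by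
  unfold Pre_calc_max_gcd_num; infer_instance
def pvWitness_calc_max_gcd_num : List Int := [2, 4, 6, 9]

def Spec_calc_max_gcd_num (nums : List Int) (out : Int) : Prop := out = calc_max_gcd_num_alt nums
instance (nums : List Int) (out : Int) : Decidable (Spec_calc_max_gcd_num nums out) := by
  unfold Spec_calc_max_gcd_num; infer_instance

-- ===== CLAIM (what is proved, stated in full; the proofs are below) =====
def Claim_equal_calc_max_gcd_num : Prop := ∀ (nums : List Int), Dom_calc_max_gcd_num nums → Pre_calc_max_gcd_num nums → Spec_calc_max_gcd_num nums (calc_max_gcd_num nums)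

-- ===== LEMMAS AND PROOFS =====

-- the indicator condition forces a positive key (second branch)
theorem pv_ind_pos (a k j : Int) (ha : 1 ≤ a) (hk : 1 ≤ k)
    (hdvd : j ∣ a) (h : k ≤ a / j) : 1 ≤ j := by
  by_contra hj
  by_cases hj0 : j = 0
  · subst hj0; have := zero_dvd_iff.mp hdvd; omega
  · have : a / j ≤ 0 := Int.ediv_nonpos_of_nonneg_of_nonpos (by omega) (by omega)
    omega

-- once k*k > a no divisor is left to count
theorem pv_ind_stop (a k j : Int) (ha : 1 ≤ a) (hk : 1 ≤ k) (hgt : a < k * k) :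
    ¬ (j ∣ a ∧ ((k ≤ j ∧ j * j ≤ a) ∨ (k ≤ a / j ∧ a < j * j))) := by
  rintro ⟨hdvd, ⟨h1, h2⟩ | ⟨h1, h2⟩⟩
  · nlinarith [mul_nonneg (by omega : (0:Int) ≤ j - k) (by omega : (0:Int) ≤ j + k)]
  · have hj : 1 ≤ j := pv_ind_pos a k j ha hk hdvd h1
    have hq : a / j * j = a := Int.ediv_mul_cancel hdvd
    have hqj : a / j < j := by nlinarith
    nlinarith [mul_nonneg (by linarith : (0:Int) ≤ a / j - k) (by linarith : (0:Int) ≤ a / j + k),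
               mul_nonneg (by linarith : (0:Int) ≤ a / j) (by linarith : (0:Int) ≤ j - a / j)]

-- a non-divisor k contributes nothing: the condition is unchanged from k to k+1
theorem pv_ind_step_nodvd (a k j : Int) (ha : 1 ≤ a) (hk : 1 ≤ k) (hnd : ¬ k ∣ a) :
    ((j ∣ a ∧ ((k ≤ j ∧ j * j ≤ a) ∨ (k ≤ a / j ∧ a < j * j))) ↔
     (j ∣ a ∧ ((k + 1 ≤ j ∧ j * j ≤ a) ∨ (k + 1 ≤ a / j ∧ a < j * j)))) := by
  constructor
  · rintro ⟨hdvd, ⟨h1, h2⟩ | ⟨h1, h2⟩⟩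
    · have hjk : j ≠ k := fun h => hnd (h ▸ hdvd)
      exact ⟨hdvd, Or.inl ⟨by omega, h2⟩⟩
    · have hne : a / j ≠ k := by
        intro h
        have hq : a / j * j = a := Int.ediv_mul_cancel hdvd
        exact hnd ⟨j, by rw [← h]; linarith⟩
      exact ⟨hdvd, Or.inr ⟨Int.add_one_le_iff.mpr (lt_of_le_of_ne h1 (Ne.symm hne)), h2⟩⟩
  · rintro ⟨hdvd, ⟨h1, h2⟩ | ⟨h1, h2⟩⟩
    · exact ⟨hdvd, Or.inl ⟨by omega, h2⟩⟩
    · exact ⟨hdvd, Or.inr ⟨by linarith, h2⟩⟩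

-- a divisor k contributes exactly once to k and once to its cofactor a/k (when distinct)
theorem pv_ind_step_dvd (a k j : Int) (ha : 1 ≤ a) (hk : 1 ≤ k) (hle : k * k ≤ a)
    (hdvd : k ∣ a) :
    (if j ∣ a ∧ ((k ≤ j ∧ j * j ≤ a) ∨ (k ≤ a / j ∧ a < j * j)) then (1:Int) else 0) =
      (if j = k then 1 else 0) + (if j = a / k ∧ a / k ≠ k then 1 else 0) +
      (if j ∣ a ∧ ((k + 1 ≤ j ∧ j * j ≤ a) ∨ (k + 1 ≤ a / j ∧ a < j * j)) then 1 else 0) := by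
  have hek : a / k * k = a := Int.ediv_mul_cancel hdvd
  have he1 : 1 ≤ a / k := by
    rw [Int.le_ediv_iff_mul_le (by omega : (0:Int) < k)]
    nlinarith
  by_cases hjk : j = k
  · subst hjk
    rw [if_pos ⟨hdvd, Or.inl ⟨le_refl _, hle⟩⟩]
    rw [if_pos rfl]
    rw [if_neg (by rintro ⟨h1, h2⟩; exact h2 h1.symm)]
    rw [if_neg (by
      rintro ⟨_, ⟨h1, _⟩ | ⟨_, h2⟩⟩
      · omega
      · linarith)]
    norm_num
  · by_cases hje : j = a / k ∧ a / k ≠ k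
    · obtain ⟨rfl, hek'⟩ := hje
      have hgt : k < a / k := by
        rcases lt_or_ge k (a / k) with h | h
        · exact h
        · exfalso; apply hek'; nlinarith
      have hdvd2 : a / k ∣ a := ⟨k, by linarith⟩
      have haj : a / (a / k) = k := by
        have h := Int.mul_ediv_cancel_left (a := a / k) (b := k)
          (ne_of_gt (by linarith : (0:Int) < a / k))
        rwa [hek] at h
      have hlt : a < (a / k) * (a / k) := by nlinarith
      rw [if_pos ⟨hdvd2, Or.inr ⟨haj.symm.le, hlt⟩⟩]
      rw [if_neg hjk, if_pos ⟨rfl, hek'⟩]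
      rw [if_neg (by
        rintro ⟨_, ⟨h1, h2⟩ | ⟨h1, h2⟩⟩
        · linarith
        · rw [haj] at h1; omega)]
      norm_num
    · rw [if_neg hjk, if_neg hje]
      have hcond : (j ∣ a ∧ ((k ≤ j ∧ j * j ≤ a) ∨ (k ≤ a / j ∧ a < j * j))) ↔
          (j ∣ a ∧ ((k + 1 ≤ j ∧ j * j ≤ a) ∨ (k + 1 ≤ a / j ∧ a < j * j))) := by
        constructor
        · rintro ⟨hdvdj, ⟨h1, h2⟩ | ⟨h1, h2⟩⟩
          · exact ⟨hdvdj, Or.inl ⟨by omega, h2⟩⟩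
          · have hne : a / j ≠ k := by
              intro h
              have hq : a / j * j = a := Int.ediv_mul_cancel hdvdj
              have hje2 : j = a / k := by
                have : k * j = a := by rw [← h]; linarith
                have : k * j = k * (a / k) := by rw [this]; linarith [hek]
                exact mul_left_cancel₀ (by omega : (k:Int) ≠ 0) this
              by_cases hekk : a / k = k
              · exact hjk (hje2.trans hekk)
              · exact hje ⟨hje2, hekk⟩
            exact ⟨hdvdj, Or.inr ⟨Int.add_one_le_iff.mpr (lt_of_le_of_ne h1 (Ne.symm hne)), h2⟩⟩
        · rintro ⟨hdvdj, ⟨h1, h2⟩ | ⟨h1, h2⟩⟩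
          · exact ⟨hdvdj, Or.inl ⟨by omega, h2⟩⟩
          · exact ⟨hdvdj, Or.inr ⟨by linarith, h2⟩⟩
      rw [if_congr hcond rfl rfl]
      ring

-- effect of the divisor loop started at k on any key j, as an indicator
theorem pv_divLoop_getD (a : Int) (ha : 1 ≤ a) :
    ∀ (cnt : PySem.Dict Int Int) (k : Int), 1 ≤ k → ∀ j : Int,
      (pvDivLoop a cnt k).getD j 0 =
        cnt.getD j 0 +
          (if j ∣ a ∧ ((k ≤ j ∧ j * j ≤ a) ∨ (k ≤ a / j ∧ a < j * j)) then 1 else 0) := by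
  intro cnt k
  fun_induction pvDivLoop a cnt k with
  | case1 cnt k hle cnt1 ih =>
    intro hk j
    rw [ih (by omega) j]
    by_cases hmod : PySem.Int.mod a k = 0
    · have hdvd : k ∣ a := (PySem.Int.mod_eq_zero_iff_dvd a k).mp hmod
      have hfd : PySem.Int.floordiv a k = a / k :=
        PySem.Int.floordiv_eq_ediv_of_pos (by omega)
      have h1 : cnt1.getD j 0 = cnt.getD j 0 +
          ((if j = k then 1 else 0) + (if j = a / k ∧ a / k ≠ k then 1 else 0)) := by
        simp only [cnt1, hfd]
        rw [dif_pos hmod]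
        by_cases hek : a / k ≠ k
        · rw [dif_pos hek]
          simp only [PySem.Dict.getD_insert]
          by_cases hjk : j = k <;> by_cases hje : j = a / k <;>
            simp [hjk, hje, hek] <;> omega
        · rw [dif_neg hek]
          simp only [PySem.Dict.getD_insert]
          by_cases hjk : j = k <;> simp [hjk, hek]
      rw [h1, pv_ind_step_dvd a k j ha hk hle hdvd]
      ring
    · have h1 : cnt1 = cnt := by simp only [cnt1]; rw [dif_neg hmod]
      rw [h1, if_congr (pv_ind_step_nodvd a k j ha hk
        (fun h => hmod ((PySem.Int.mod_eq_zero_iff_dvd a k).mpr h))) rfl rfl]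
  | case2 cnt k hgt =>
    intro hk j
    rw [if_neg (pv_ind_stop a k j ha hk (not_le.mp hgt)), add_zero]

-- starting at k = 1 the loop counts every positive divisor exactly once
theorem pv_divLoop_one (a : Int) (ha : 1 ≤ a) (cnt : PySem.Dict Int Int) (j : Int) :
    (pvDivLoop a cnt 1).getD j 0 = cnt.getD j 0 + (if j ∣ a ∧ 1 ≤ j then 1 else 0) := by
  rw [pv_divLoop_getD a ha cnt 1 (by norm_num) j]
  congr 1
  refine if_congr ?_ rfl rfl
  constructor
  · rintro ⟨hdvd, ⟨h1, _⟩ | ⟨h1, _⟩⟩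
    · exact ⟨hdvd, h1⟩
    · exact ⟨hdvd, pv_ind_pos a 1 j ha (le_refl 1) hdvd h1⟩
  · rintro ⟨hdvd, hj⟩
    refine ⟨hdvd, ?_⟩
    by_cases hsq : j * j ≤ a
    · exact Or.inl ⟨hj, hsq⟩
    · refine Or.inr ⟨?_, not_le.mp hsq⟩
      rw [Int.le_ediv_iff_mul_le (by omega : (0:Int) < j)]
      have := Int.le_of_dvd (by omega) hdvd
      linarith

-- one pass over nums: the counter holds, for every key j ≥ 1, the number of nonzero
-- elements j divides; the second component counts the zeros
theorem pv_fold_state (nums : List Int) :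
    ∀ (cnt : PySem.Dict Int Int) (z : Int),
      (∀ j : Int, 1 ≤ j →
        (nums.foldl
          (fun (st : PySem.Dict Int Int × Int) num =>
            let a := |num|
            if a = 0 then (st.1, st.2 + 1)
            else (pvDivLoop a st.1 1, st.2)) (cnt, z)).1.getD j 0 =
          cnt.getD j 0 + (nums.countP (fun num => decide (j ∣ num ∧ num ≠ 0)) : Int))
      ∧
      (nums.foldl
          (fun (st : PySem.Dict Int Int × Int) num =>
            let a := |num|
            if a = 0 then (st.1, st.2 + 1)
            else (pvDivLoop a st.1 1, st.2)) (cnt, z)).2 =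
        z + (nums.countP (fun num => num == 0) : Int) := by
  induction nums with
  | nil => intro cnt z; simp
  | cons num t ih =>
    intro cnt z
    simp only [List.foldl_cons, List.countP_cons]
    by_cases h0 : |num| = 0
    · have hz : num = 0 := abs_eq_zero.mp h0
      rw [if_pos h0]
      obtain ⟨ih1, ih2⟩ := ih cnt (z + 1)
      constructor
      · intro j hj
        rw [ih1 j hj]
        subst hz
        simp
      · rw [ih2]
        subst hz
        simp
        ring
    · have ha : 1 ≤ |num| := by have := abs_nonneg num; omega
      rw [if_neg h0]
      obtain ⟨ih1, ih2⟩ := ih (pvDivLoop |num| cnt 1) z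
      constructor
      · intro j hj
        rw [ih1 j hj, pv_divLoop_one |num| ha cnt j]
        have hiff : (j ∣ |num| ∧ 1 ≤ j) ↔ (j ∣ num ∧ num ≠ 0) := by
          rw [dvd_abs]
          constructor
          · rintro ⟨h1, _⟩; exact ⟨h1, fun h => h0 (by simp [h])⟩
          · rintro ⟨h1, _⟩; exact ⟨h1, hj⟩
        rw [if_congr hiff rfl rfl]
        by_cases hp : j ∣ num ∧ num ≠ 0
        · rw [if_pos hp]
          simp [hp.1, hp.2]
          ring
        · rw [if_neg hp]
          have : ¬ (decide (j ∣ num ∧ num ≠ 0) = true) := by simpa using hp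
          simp [this]
      · rw [ih2]
        have : ¬ (num == 0) = true := by simpa using fun h => h0 (by simp [h])
        simp [this]

-- A's per-candidate count splits into zeros plus nonzero multiples
theorem pv_count_split_nat (nums : List Int) (i : Int) :
    nums.countP (fun num => decide (PySem.Int.mod num i = 0)) =
      nums.countP (fun num => num == 0) +
        nums.countP (fun num => decide (i ∣ num ∧ num ≠ 0)) := by
  induction nums with
  | nil => rfl
  | cons num t ih =>
    rw [List.countP_cons, List.countP_cons, List.countP_cons, ih]
    have hmod : (decide (PySem.Int.mod num i = 0)) = decide (i ∣ num) := by
      simp [PySem.Int.mod_eq_zero_iff_dvd]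
    rw [hmod]
    by_cases h0 : num = 0
    · simp [h0]; omega
    · by_cases hd : i ∣ num <;> simp [h0, hd] <;> omega

theorem pv_count_split (nums : List Int) (i : Int) :
    (nums.countP (fun num => decide (PySem.Int.mod num i = 0)) : Int) =
      (nums.countP (fun num => num == 0) : Int) +
      (nums.countP (fun num => decide (i ∣ num ∧ num ≠ 0)) : Int) := by
  exact_mod_cast congrArg (Nat.cast : Nat → Int) (pv_count_split_nat nums i)

theorem calc_max_gcd_num_spec : Claim_equal_calc_max_gcd_num := by
  intro nums _ hpre
  unfold Spec_calc_max_gcd_num calc_max_gcd_num calc_max_gcd_num_alt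
  cases hm : PySem.List.max? nums (fun x => x) with
  | none => exact absurd ((PySem.List.max?_eq_none_iff nums _).mp hm) hpre
  | some m =>
    simp only []
    congr 1
    refine PySem.List.foldl_congr_mem' _ _ _ _ (fun i hi st => ?_)
    have h2i : (2 : Int) ≤ i := ((PySem.List.mem_pyRange_one).mp hi).1
    obtain ⟨h1, h2⟩ := pv_fold_state nums PySem.Dict.empty 0
    rw [PySem.List.foldl_ite_add_one (fun num => PySem.Int.mod num i = 0) nums 0,
      zero_add]
    rw [h1 i (by omega), h2, PySem.Dict.getD_empty, pv_count_split nums i]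
    ring_nf
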